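-- pv_equiv track=rewrite | github.com/CCN0807/telegram_b2_bot | poker_algorithm.py | check_three_two
-- ===== SOURCE A (Python) =====
-- def check_three_two(list):
--     unique_list = []
--     number_list = []
--     for c in list:
--         if c[0] not in unique_list:
--             unique_list.append(c[0])
--             number_list.append(1)
--         else:
--             number_list[unique_list.index(c[0])] += 1
--
--     if(len(unique_list) == 2):
--         appear_max_number = max(number_list)
--         if(appear_max_number == 3):
--             return 1200 + unique_list[number_list.index(appear_max_number)]*10
--         elif(appear_max_number == 4):
--             return 1600 + unique_list[number_list.index(appear_max_number)]*10
--     else: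
--         return 0
-- ===== SOURCE B (Python) =====
-- def check_three_two(list):
--     ranks = sorted(c[0] for c in list)
--     runs = 0
--     run_len = 0
--     best_len = 0
--     best_rank = 0
--     prev = None
--     for r in ranks:
--         if prev is not None and r == prev:
--             run_len += 1
--         else:
--             runs += 1
--             run_len = 1
--             prev = r
--         if run_len > best_len:
--             best_len = run_len
--             best_rank = r
--     if runs != 2:
--         return 0
--     if best_len == 3:
--         return 1200 + best_rank * 10
--     if best_len == 4:
--         return 1600 + best_rank * 10
-- ===== Notes on version B (the rewrite author's own statement) =====
-- stated objective: alternative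
-- what changed: A's parallel unique/count lists maintained with membership tests and list.index lookups are replaced by sorting the ranks once and a single linear run-length pass that tracks the number of runs, the longest run and its rank; the tally structure disappears entirely.
-- outside the precondition, e.g. on check_three_two([(9, 0), (9, 0), (9, 0), (2, 0), (2, 0), (2, 0)]): A returns 1290, B returns 1220; on check_three_two([(5, 0), (5, 0), (2, 0)]): A returns None, B returns None
import Mathlib
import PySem

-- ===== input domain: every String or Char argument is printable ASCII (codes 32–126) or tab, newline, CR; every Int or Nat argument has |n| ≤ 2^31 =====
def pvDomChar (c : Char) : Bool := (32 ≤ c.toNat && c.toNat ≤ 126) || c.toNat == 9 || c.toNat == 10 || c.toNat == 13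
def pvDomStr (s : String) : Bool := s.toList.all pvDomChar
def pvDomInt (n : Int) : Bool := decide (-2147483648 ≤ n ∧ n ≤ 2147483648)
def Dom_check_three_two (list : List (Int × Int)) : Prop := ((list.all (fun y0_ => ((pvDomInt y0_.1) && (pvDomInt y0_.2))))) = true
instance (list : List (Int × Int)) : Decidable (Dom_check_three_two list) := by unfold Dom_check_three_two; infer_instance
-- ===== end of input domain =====

-- B replaces A's parallel unique/count lists (membership tests plus list.index increments)
-- by sorting the ranks once and a single run-length pass over the sorted list — objective: alternative.

-- ===== PORT A =====
-- A's loop step: parallel lists (unique_list, number_list); 'not in' appends, else increments at .index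
def pvAStep (st : List Int × List Int) (c : Int × Int) : List Int × List Int :=
  if c.1 ∉ st.1 then (st.1 ++ [c.1], st.2 ++ [1])
  else
    match PySem.List.index? st.1 c.1 with
    | some i => (st.1, st.2.modify i (· + 1))
    | none => st  -- unreachable: c.1 ∈ st.1

def check_three_two (list : List (Int × Int)) : Int :=
  let st := list.foldl pvAStep ([], [])
  if st.1.length = 2 then
    match PySem.List.max? st.2 (fun y => y) with
    | some m =>
      if m = 3 then
        match PySem.List.index? st.2 m with
        | some i => 1200 + (st.1.getD i 0) * 10
        | none => 0  -- unreachable: m ∈ st.2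
      else if m = 4 then
        match PySem.List.index? st.2 m with
        | some i => 1600 + (st.1.getD i 0) * 10
        | none => 0  -- unreachable
      else 0  -- Python falls through (None) here: outside Pre_
    | none => 0  -- unreachable: st.2 has length 2
  else 0

-- ===== PORT B =====
-- B's loop body: state (prev, run_len, runs, best_len, best_rank); new run on a changed rank,
-- record the longest run and its rank
def pvBStep (st : Option Int × Int × Int × Int × Int) (r : Int) : Option Int × Int × Int × Int × Int :=
  match st with
  | (prev, rl, runs, bl, br) =>
    let s2 : Option Int × Int × Int :=
      match prev with
      | some p => if r = p then (prev, rl + 1, runs) else (some r, 1, runs + 1)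
      | none => (some r, 1, runs + 1)
    match s2 with
    | (prev', rl', runs') =>
      if rl' > bl then (prev', rl', runs', rl', r) else (prev', rl', runs', bl, br)

def check_three_two_alt (list : List (Int × Int)) : Int :=
  let ranks := PySem.List.sorted (list.map Prod.fst) (fun x => x) false
  let st := ranks.foldl pvBStep (none, 0, 0, 0, 0)
  let runs := st.2.2.1
  let best_len := st.2.2.2.1
  let best_rank := st.2.2.2.2
  if runs ≠ 2 then 0
  else if best_len = 3 then 1200 + best_rank * 10
  else if best_len = 4 then 1600 + best_rank * 10
  else 0  -- Python falls through (None) here: outside Pre_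

-- ===== PRECONDITION & SPEC =====
-- Pre_ excludes hands with exactly two distinct ranks (i) whose maximum multiplicity is neither 3
-- nor 4 — there Python A falls off the if/elif and returns None instead of an int (B likewise) —
-- and (ii) whose two multiplicities are equal (3+3 or 4+4): there A's scored rank is whichever
-- was inserted first, an accidental first-vs-last tie-break no caller could rely on.
def Pre_check_three_two (list : List (Int × Int)) : Prop :=
  (list.map Prod.fst).dedup.length = 2 →
    (((list.map Prod.fst).dedup.map (fun r => ((list.map Prod.fst).count r : Int))).foldl max 0 = 3 ∨
     ((list.map Prod.fst).dedup.map (fun r => ((list.map Prod.fst).count r : Int))).foldl max 0 = 4) ∧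
    ((list.map Prod.fst).dedup.map (fun r => (list.map Prod.fst).count r)).Nodup
instance (list : List (Int × Int)) : Decidable (Pre_check_three_two list) := by
  unfold Pre_check_three_two; infer_instance

def pvWitness_check_three_two : (List (Int × Int)) := [(5,0),(5,1),(5,2),(2,0),(2,1)]

def Spec_check_three_two (list : List (Int × Int)) (out : Int) : Prop := out = check_three_two_alt list
instance (list : List (Int × Int)) (out : Int) : Decidable (Spec_check_three_two list out) := by unfold Spec_check_three_two; infer_instance

-- ===== CLAIM (what is proved, stated in full; the proofs are below) =====
def Claim_equal_check_three_two : Prop := ∀ (list : List (Int × Int)), Dom_check_three_two list → Pre_check_three_two list → Spec_check_three_two list (check_three_two list)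

-- ===== LEMMAS AND PROOFS =====

-- A's dedup fold (first-occurrence order), isolated for the tally invariant
def pvDedupStep (d : List Int) (r : Int) : List Int := if r ∉ d then d ++ [r] else d

theorem pvDedupStep_nodup : ∀ (rs : List Int) (d : List Int), d.Nodup → (rs.foldl pvDedupStep d).Nodup := by
  intro rs
  induction rs with
  | nil => intro d h; simpa using h
  | cons r t ih =>
    intro d h
    simp only [List.foldl_cons, pvDedupStep]
    split
    · exact ih _ (by simp [List.nodup_append, h]; intro b hb hbr; exact ‹r ∉ d› (hbr ▸ hb))
    · exact ih _ h

theorem pvDedup_mem : ∀ (rs : List Int) (d : List Int) (x : Int),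
    x ∈ rs.foldl pvDedupStep d ↔ x ∈ d ∨ x ∈ rs := by
  intro rs
  induction rs with
  | nil => intro d x; simp
  | cons r t ih =>
    intro d x
    simp only [List.foldl_cons, pvDedupStep]
    split
    · rw [ih]; simp [or_assoc]
    · rw [ih]; rename_i hmem
      simp only [not_not] at hmem
      simp only [List.mem_cons]
      constructor
      · tauto
      · rintro (h | h | h)
        · exact Or.inl h
        · exact Or.inl (h ▸ hmem)
        · exact Or.inr h

-- A's tally loop invariant
theorem pvTally : ∀ (l : List (Int × Int)) (ul : List Int) (g : Int → Int), ul.Nodup →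
    l.foldl pvAStep (ul, ul.map g) =
      ((l.map Prod.fst).foldl pvDedupStep ul,
       ((l.map Prod.fst).foldl pvDedupStep ul).map
         (fun r => (if r ∈ ul then g r else 0) + ((l.map Prod.fst).count r : Int))) := by
  intro l
  induction l with
  | nil =>
    intro ul g _
    simp only [List.foldl_nil, List.map_nil, List.count_nil]
    refine Prod.ext rfl ?_
    apply List.map_congr_left
    intro r hr
    simp [hr]
  | cons c t ih =>
    intro ul g hnd
    simp only [List.foldl_cons, List.map_cons]
    by_cases hmem : c.1 ∈ ul
    · have hidx : ∃ i, PySem.List.index? ul c.1 = some i := by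
        rcases h : PySem.List.index? ul c.1 with _ | i
        · rw [PySem.List.index?_eq_none_iff] at h; exact absurd hmem h
        · exact ⟨i, rfl⟩
      obtain ⟨i, h⟩ := hidx
      obtain ⟨hk, hget, hfirst⟩ := PySem.List.getElem_of_index?_eq_some h
      have hstep : pvAStep (ul, ul.map g) c =
          (ul, ul.map (fun r => if r = c.1 then g r + 1 else g r)) := by
        unfold pvAStep
        simp only [hmem, not_true_eq_false, if_false, h]
        refine Prod.ext rfl ?_
        apply List.ext_getElem (by simp)
        intro j hj hj'
        have hjlen : j < ul.length := by simpa using hj'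
        rw [List.getElem_map, List.getElem_modify, List.getElem_map]
        by_cases hij : i = j
        · subst hij; simp [hget]
        · have hne : ul[j] ≠ c.1 := by
            intro hEq
            exact hij ((List.Nodup.getElem_inj_iff hnd).mp (hget.trans hEq.symm))
          simp [hij, hne]
      rw [hstep, ih ul _ hnd]
      have hstepb : pvDedupStep ul c.1 = ul := by simp [pvDedupStep, hmem]
      rw [hstepb]
      refine Prod.ext rfl ?_
      apply List.map_congr_left
      intro r _
      by_cases hr : r ∈ ul
      · by_cases hrc : r = c.1
        · subst hrc; simp [hr, List.count_cons_self]; ring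
        · simp [hr, hrc, List.count_cons_of_ne (by exact fun h => hrc h.symm)]
      · have hrc : r ≠ c.1 := fun h => hr (h ▸ hmem)
        simp [hr, List.count_cons_of_ne (by exact fun h => hrc h.symm)]
    · have hstep : pvAStep (ul, ul.map g) c =
          (ul ++ [c.1], (ul ++ [c.1]).map (fun r => if r = c.1 then 1 else g r)) := by
        unfold pvAStep
        simp only [hmem, not_false_eq_true, if_true]
        refine Prod.ext rfl ?_
        simp only [List.map_append, List.map_cons, List.map_nil]
        congr 1
        apply List.map_congr_left
        intro r hr
        have : r ≠ c.1 := fun h => hmem (h ▸ hr)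
        simp [this]
      have hnd' : (ul ++ [c.1]).Nodup := by
        simp [List.nodup_append, hnd]
        intro b hb hbc; exact hmem (hbc ▸ hb)
      rw [hstep, ih (ul ++ [c.1]) _ hnd']
      have hstepb : pvDedupStep ul c.1 = ul ++ [c.1] := by simp [pvDedupStep, hmem]
      rw [hstepb]
      refine Prod.ext rfl ?_
      apply List.map_congr_left
      intro r _
      by_cases hrc : r = c.1
      · subst hrc
        simp [hmem, List.count_cons_self]
        ring
      · have : (r ∈ ul ++ [c.1]) ↔ r ∈ ul := by simp [hrc]
        by_cases hr : r ∈ ul <;>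
          simp [this, hr, hrc, List.count_cons_of_ne (by exact fun h => hrc h.symm)]

theorem pvTally0 (l : List (Int × Int)) :
    l.foldl pvAStep ([], []) =
      ((l.map Prod.fst).foldl pvDedupStep [],
       ((l.map Prod.fst).foldl pvDedupStep []).map (fun r => ((l.map Prod.fst).count r : Int))) := by
  have := pvTally l [] (fun _ => 0) List.nodup_nil
  simpa using this

theorem pvRun2 : ∀ (k : ℕ) (r rl runs bl br : Int), rl ≤ bl →
    (List.replicate k r).foldl pvBStep (some r, rl, runs, bl, br)
      = (some r, rl + k, runs, max bl (rl + k), if bl < rl + k then r else br) := by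
  intro k
  induction k with
  | zero =>
    intro r rl runs bl br h
    simp only [List.replicate, List.foldl_nil, Nat.cast_zero, add_zero]
    rw [max_eq_left h, if_neg (not_lt.mpr h)]
  | succ k ih =>
    intro r rl runs bl br h
    rw [List.replicate_succ, List.foldl_cons]
    have hstep : pvBStep (some r, rl, runs, bl, br) r
        = (some r, rl + 1, runs, max bl (rl + 1), if bl < rl + 1 then r else br) := by
      simp only [pvBStep, if_true]
      by_cases hb : rl + 1 > bl
      · rw [if_pos hb, max_eq_right (le_of_lt hb), if_pos hb]
      · rw [if_neg hb, max_eq_left (not_lt.mp hb), if_neg (by omega)]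
    rw [hstep, ih r (rl + 1) runs (max bl (rl + 1)) _ (le_max_right _ _)]
    refine Prod.ext rfl (Prod.ext (by push_cast; ring) (Prod.ext rfl (Prod.ext ?_ ?_))) <;> simp only
    · push_cast; omega
    · push_cast; split_ifs <;> first | rfl | omega

theorem pvRun1 : ∀ (k : ℕ) (r : Int) (p : Option Int) (rl runs bl br : Int), k ≠ 0 → p ≠ some r →
    rl ≤ bl → 0 ≤ bl →
    (List.replicate k r).foldl pvBStep (p, rl, runs, bl, br)
      = (some r, (k : Int), runs + 1, max bl (k : Int), if bl < (k : Int) then r else br) := by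
  intro k r p rl runs bl br hk hp hrl hbl
  obtain ⟨k', rfl⟩ : ∃ k', k = k' + 1 := ⟨k - 1, by omega⟩
  rw [List.replicate_succ, List.foldl_cons]
  have hstep : pvBStep (p, rl, runs, bl, br) r
      = (some r, 1, runs + 1, max bl 1, if bl < 1 then r else br) := by
    match p with
    | none =>
      simp only [pvBStep]
      by_cases hb : (1:Int) > bl
      · rw [if_pos hb, max_eq_right (le_of_lt hb), if_pos hb]
      · rw [if_neg hb, max_eq_left (not_lt.mp hb), if_neg (by omega)]
    | some q =>
      have hq : r ≠ q := fun h => hp (by rw [h])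
      simp only [pvBStep, if_neg hq]
      by_cases hb : (1:Int) > bl
      · rw [if_pos hb, max_eq_right (le_of_lt hb), if_pos hb]
      · rw [if_neg hb, max_eq_left (not_lt.mp hb), if_neg (by omega)]
  rw [hstep, pvRun2 k' r 1 (runs + 1) (max bl 1) _ (le_max_right _ _)]
  refine Prod.ext rfl (Prod.ext (by push_cast; ring) (Prod.ext rfl (Prod.ext ?_ ?_))) <;> simp only
  · push_cast; omega
  · push_cast; split_ifs <;> first | rfl | omega

def pvRunsAdded (p : Option Int) (l : List Int) : ℕ :=
  match l with
  | [] => 0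
  | r :: t => (if some r = p then 0 else 1) + pvRunsAdded (some r) t

theorem pvRuns_eq : ∀ (l : List Int) (st : Option Int × Int × Int × Int × Int),
    (l.foldl pvBStep st).2.2.1 = st.2.2.1 + (pvRunsAdded st.1 l : Int) := by
  intro l
  induction l with
  | nil => intro st; simp [pvRunsAdded]
  | cons r t ih =>
    intro st
    obtain ⟨p, rl, runs, bl, br⟩ := st
    rw [List.foldl_cons, ih]
    match p with
    | none =>
      simp only [pvBStep, pvRunsAdded]
      split_ifs <;> simp_all <;> push_cast <;> try ring
    | some q =>
      by_cases h : r = q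
      · subst h
        simp only [pvBStep, pvRunsAdded]
        split_ifs <;> simp_all <;> push_cast <;> try ring
      · have h' : ¬ (some r = some q) := fun hc => h (by injection hc)
        simp only [pvBStep, pvRunsAdded]
        split_ifs <;> simp_all <;> push_cast <;> try ring

theorem pvRunsAdded_sorted : ∀ (l : List Int) (p : Option Int), l.Pairwise (· ≤ ·) →
    (∀ q, p = some q → ∀ x ∈ l, q ≤ x) →
    pvRunsAdded p l = l.dedup.length - (match p with | some q => if q ∈ l then 1 else 0 | none => 0) := by
  intro l
  induction l with
  | nil => intro p _ _; cases p <;> simp [pvRunsAdded]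
  | cons r t ih =>
    intro p hs hp
    have hrt : ∀ x ∈ t, r ≤ x := fun x hx => List.rel_of_pairwise_cons hs hx
    have hst : t.Pairwise (· ≤ ·) := (List.pairwise_cons.mp hs).2
    have iht := ih (some r) hst (fun q hq x hx => by injection hq with h; exact h ▸ hrt x hx)
    simp only at iht
    have hdpos : r ∈ t → 1 ≤ t.dedup.length := fun hm =>
      List.length_pos_of_mem (List.mem_dedup.mpr hm)
    by_cases hrmem : r ∈ t
    · rw [List.dedup_cons_of_mem hrmem]
      simp only [pvRunsAdded, iht, if_pos hrmem]
      have hd1 := hdpos hrmem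
      rcases p with _ | q
      · show (if (some r = none) then 0 else 1) + (t.dedup.length - 1) = t.dedup.length - 0
        rw [if_neg (by simp)]; omega
      · show (if (some r = some q) then 0 else 1) + (t.dedup.length - 1)
            = t.dedup.length - (if q ∈ r :: t then 1 else 0)
        by_cases hqr : q = r
        · subst hqr
          rw [if_pos rfl, if_pos (by simp)]
          omega
        · have hq1 : q ≤ r := hp q rfl r (by simp)
          have hqt : q ∉ t := fun hc => hqr (le_antisymm hq1 (hrt q hc))
          rw [if_neg (fun hc => hqr (by injection hc with h; exact h.symm)),
            if_neg (by simp only [List.mem_cons]; rintro (h | h); exacts [hqr h, hqt h])]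
          omega
    · rw [List.dedup_cons_of_notMem hrmem]
      simp only [pvRunsAdded, iht, if_neg hrmem, List.length_cons]
      rcases p with _ | q
      · show (if (some r = none) then 0 else 1) + (t.dedup.length - 0) = t.dedup.length + 1 - 0
        rw [if_neg (by simp)]; omega
      · show (if (some r = some q) then 0 else 1) + (t.dedup.length - 0)
            = t.dedup.length + 1 - (if q ∈ r :: t then 1 else 0)
        by_cases hqr : q = r
        · subst hqr
          rw [if_pos rfl, if_pos (by simp)]
          omega
        · have hq1 : q ≤ r := hp q rfl r (by simp)
          have hqt : q ∉ t := fun hc => hqr (le_antisymm hq1 (hrt q hc))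
          rw [if_neg (fun hc => hqr (by injection hc with h; exact h.symm)),
            if_neg (by simp only [List.mem_cons]; rintro (h | h); exacts [hqr h, hqt h])]
          omega

theorem pvTwoElt (l : List Int) (a b : Int) (hab : a ≠ b) (hnd : l.Nodup)
    (hm : ∀ x, x ∈ l ↔ x = a ∨ x = b) : l = [a, b] ∨ l = [b, a] := by
  match l with
  | [] => exact absurd ((hm a).mpr (Or.inl rfl)) (by simp)
  | [x] =>
    have ha := (hm a).mpr (Or.inl rfl)
    have hb := (hm b).mpr (Or.inr rfl)
    simp at ha hb
    exact absurd (ha.trans hb.symm) hab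
  | x :: y :: z :: t =>
    have hx := (hm x).mp (by simp)
    have hy := (hm y).mp (by simp)
    have hz := (hm z).mp (by simp)
    simp [List.nodup_cons] at hnd
    rcases hx with rfl | rfl <;> rcases hy with rfl | rfl <;> rcases hz with rfl | rfl <;> tauto
  | [x, y] =>
    have hx := (hm x).mp (by simp)
    have hy := (hm y).mp (by simp)
    have hxy : x ≠ y := by simp [List.nodup_cons] at hnd; tauto
    rcases hx with rfl | rfl <;> rcases hy with rfl | rfl <;> tauto

theorem pvSortedTwo (rs : List Int) (a b : Int) (hab : a < b) (hmem : ∀ x ∈ rs, x = a ∨ x = b) :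
    PySem.List.sorted rs (fun x => x) false
      = List.replicate (rs.count a) a ++ List.replicate (rs.count b) b := by
  apply PySem.List.sorted_id_eq_of_perm_of_pairwise
  · rw [List.perm_iff_count]
    intro x
    rw [List.count_append]
    simp only [List.count_replicate, beq_iff_eq]
    split_ifs with h1 h2 h2
    · exact absurd (h1.trans h2.symm) (by omega)
    · subst h1; simp
    · subst h2; simp
    · have : x ∉ rs := by
        intro hc
        rcases hmem x hc with h | h
        · exact h1 h.symm
        · exact h2 h.symm
      simp [List.count_eq_zero.mpr this]
  · apply List.pairwise_append.mpr
    refine ⟨List.pairwise_replicate.mpr (by simp), List.pairwise_replicate.mpr (by simp), ?_⟩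
    intro x hx y hy
    rw [List.eq_of_mem_replicate hx, List.eq_of_mem_replicate hy]
    exact le_of_lt hab

-- B's fold on a two-valued hand: two runs, the longer run's rank recorded
theorem pvBval (rs : List Int) (lo hi : Int) (hlohi : lo < hi)
    (hmem : ∀ x ∈ rs, x = lo ∨ x = hi) (hlo : lo ∈ rs) (hhi : hi ∈ rs) :
    (PySem.List.sorted rs (fun x => x) false).foldl pvBStep (none, 0, 0, 0, 0)
      = (some hi, (rs.count hi : Int), 2, max (rs.count lo : Int) (rs.count hi : Int),
         if (rs.count lo : Int) < (rs.count hi : Int) then hi else lo) := by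
  have hclo : rs.count lo ≠ 0 := by
    rw [← List.count_pos_iff] at hlo; omega
  have hchi : rs.count hi ≠ 0 := by
    rw [← List.count_pos_iff] at hhi; omega
  rw [pvSortedTwo rs lo hi hlohi hmem, List.foldl_append,
    pvRun1 (rs.count lo) lo none 0 0 0 0 hclo (by simp) le_rfl le_rfl]
  have h1 : max (0 : Int) (rs.count lo : Int) = (rs.count lo : Int) := by
    rw [max_eq_right]; positivity
  have h2 : (0 : Int) < (rs.count lo : Int) := by exact_mod_cast Nat.pos_of_ne_zero hclo
  rw [h1, if_pos h2,
    pvRun1 (rs.count hi) hi (some lo) (rs.count lo) (0 + 1) (rs.count lo) lo hchi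
      (fun hc => absurd (by injection hc) (ne_of_lt hlohi)) le_rfl (by positivity)]
  norm_num

-- ===== VERDICT (by name: the statement is the Claim_ definition above) =====
theorem check_three_two_spec : Claim_equal_check_three_two := by
  intro list _ hpre
  unfold Spec_check_three_two check_three_two check_three_two_alt
  dsimp only
  rw [pvTally0]
  set rs := list.map Prod.fst with hrs
  set D := rs.foldl pvDedupStep [] with hD
  have hnd : D.Nodup := pvDedupStep_nodup rs [] List.nodup_nil
  have hmemD : ∀ x, x ∈ D ↔ x ∈ rs := fun x => by rw [hD, pvDedup_mem]; simp
  have hsorted := PySem.List.sorted_pairwise rs (fun x => x) (κ := Int)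
  have hdl : (PySem.List.sorted rs (fun x => x) false).dedup.length = D.length := by
    have h1 : (PySem.List.sorted rs (fun x => x) false).dedup.length = rs.dedup.length :=
      ((PySem.List.sorted_perm rs (fun x => x) false).dedup).length_eq
    have h2 : D.toFinset = rs.toFinset := by
      ext x; simp only [List.mem_toFinset]; exact hmemD x
    have h3 : rs.dedup.length = D.length := by
      rw [← List.card_toFinset, ← h2, List.toFinset_card_of_nodup hnd]
    rw [h1, h3]
  have hruns : ((PySem.List.sorted rs (fun x => x) false).foldl pvBStep
      (none, 0, 0, 0, 0)).2.2.1 = (D.length : Int) := by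
    rw [pvRuns_eq, pvRunsAdded_sorted _ none hsorted (by simp)]
    simp [hdl]
  have h3len : rs.dedup.length = D.length := by
    have h2 : D.toFinset = rs.toFinset := by
      ext x; simp only [List.mem_toFinset]; exact hmemD x
    rw [← List.card_toFinset, ← h2, List.toFinset_card_of_nodup hnd]
  by_cases hD2 : D.length = 2
  · obtain ⟨a, b, hDab⟩ := List.length_eq_two.mp hD2
    have hab : a ≠ b := by
      have hx := hnd; rw [hDab] at hx; simp [List.nodup_cons] at hx; exact hx
    have hrsd2 : rs.dedup.length = 2 := by rw [h3len, hD2]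
    obtain ⟨hmax, hcnod⟩ := hpre hrsd2
    have hmemab : ∀ x ∈ rs, x = a ∨ x = b := fun x hx => by
      have := (hmemD x).mpr hx; rw [hDab] at this; simpa using this
    have ha : a ∈ rs := (hmemD a).mp (by rw [hDab]; simp)
    have hb : b ∈ rs := (hmemD b).mp (by rw [hDab]; simp)
    have hne : rs.count a ≠ rs.count b := by
      rcases pvTwoElt rs.dedup a b hab (List.nodup_dedup rs)
          (fun x => by rw [List.mem_dedup, ← hmemD, hDab]; simp) with h | h <;>
        rw [h] at hcnod <;> simp [List.nodup_cons] at hcnod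
      · exact hcnod
      · exact fun h => hcnod h.symm
    rcases lt_or_gt_of_ne hab with hlt | hlt
    · have hBv := pvBval rs a b hlt hmemab ha hb
      rw [hDab, hBv]
      simp only [List.map_cons, List.map_nil, List.length_cons, List.length_nil,
        PySem.List.max?_id_cons, List.foldl_cons, List.foldl_nil]
      rw [if_pos trivial, if_neg (show ¬((2:Int) ≠ 2) from by omega)]
      have hneZ : ((rs.count a : Int)) ≠ ((rs.count b : Int)) := by exact_mod_cast hne
      by_cases hcc : ((rs.count a : Int)) < ((rs.count b : Int))
      · have hbeq : (((rs.count a : Int)) == ((rs.count b : Int))) = false := by simp; omega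
        rw [max_eq_right (le_of_lt hcc)]
        simp [PySem.List.index?_eq_idxOf?, List.idxOf?_cons, hbeq, hcc]
      · have hcc' : ((rs.count b : Int)) < ((rs.count a : Int)) := by omega
        rw [max_eq_left (le_of_lt hcc')]
        simp [PySem.List.index?_eq_idxOf?, List.idxOf?_cons, hcc]
    · have hBv := pvBval rs b a hlt (fun x hx => (hmemab x hx).symm) hb ha
      rw [hDab, hBv]
      simp only [List.map_cons, List.map_nil, List.length_cons, List.length_nil,
        PySem.List.max?_id_cons, List.foldl_cons, List.foldl_nil]
      rw [if_pos trivial, if_neg (show ¬((2:Int) ≠ 2) from by omega)]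
      have hneZ : ((rs.count a : Int)) ≠ ((rs.count b : Int)) := by exact_mod_cast hne
      by_cases hcc : ((rs.count a : Int)) < ((rs.count b : Int))
      · have hbeq : (((rs.count a : Int)) == ((rs.count b : Int))) = false := by simp; omega
        rw [max_eq_right (le_of_lt hcc), max_eq_left (le_of_lt hcc)]
        simp [PySem.List.index?_eq_idxOf?, List.idxOf?_cons, hbeq,
          show ¬ ((rs.count b : Int) < (rs.count a : Int)) from by omega]
      · have hcc' : ((rs.count b : Int)) < ((rs.count a : Int)) := by omega
        rw [max_eq_left (le_of_lt hcc'), max_eq_right (le_of_lt hcc')]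
        simp [PySem.List.index?_eq_idxOf?, List.idxOf?_cons, hcc']
  · -- A: the two-distinct branch is not taken, B: runs ≠ 2; both return 0
    have hrunsne : (List.foldl pvBStep (none, 0, 0, 0, 0)
        (PySem.List.sorted rs (fun x => x))).2.2.1 ≠ 2 := by
      rw [hruns]; exact_mod_cast hD2
    simp [hD2, hrunsne]
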